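-- pv_equiv track=rewrite | github.com/kthorn/cocktail-research | cocktail-utils/src/cocktail_utils/recipes/sources.py | derive_source_url
-- ===== SOURCE A (Python) =====
-- def derive_source_url(recipe_name: str) -> str:
--     """Derive Punch source URL from recipe name."""
--     clean_name = recipe_name.lower()
--
--     # Replace unicode characters
--     unicode_replacements = {
--         "\u2019": "'",  # right single quotation mark
--         "\u2018": "'",  # left single quotation mark
--         "\u201c": '"',  # left double quotation mark
--         "\u201d": '"',  # right double quotation mark
--         "\u00a0": " ",  # non-breaking space
--     }
--     for unicode_char, replacement in unicode_replacements.items():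
--         clean_name = clean_name.replace(unicode_char, replacement)
--
--     # Remove special characters
--     clean_name = "".join(c for c in clean_name if c.isalnum() or c in " -&")
--     clean_name = clean_name.replace(" ", "-").replace("&", "and")
--     clean_name = "-".join(filter(None, clean_name.split("-")))
--
--     return f"https://punchdrink.com/recipes/{clean_name}/"
-- ===== SOURCE B (Python) =====
-- def derive_source_url(recipe_name: str) -> str:
--     """Derive Punch source URL from recipe name (single-pass cleanup)."""
--     clean_name = recipe_name.lower()
--
--     unicode_replacements = {
--         "\u2019": "'",
--         "\u2018": "'",
--         "\u201c": '"',
--         "\u201d": '"',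
--         "\u00a0": " ",
--     }
--     for unicode_char, replacement in unicode_replacements.items():
--         clean_name = clean_name.replace(unicode_char, replacement)
--
--     # One pass: collapse runs of spaces/dashes into a single dash (never
--     # leading or trailing), map '&' to 'and', keep alnum, drop the rest.
--     out = []
--     pending = False
--     for c in clean_name:
--         if c == " " or c == "-":
--             if out:
--                 pending = True
--         elif c == "&":
--             if pending:
--                 out.append("-")
--                 pending = False
--             out.append("and")
--         elif c.isalnum():
--             if pending:
--                 out.append("-")
--                 pending = False
--             out.append(c)
--
--     return f"https://punchdrink.com/recipes/{''.join(out)}/"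
-- ===== Notes on version B (the rewrite author's own statement) =====
-- stated objective: alternative
-- what changed: The filter comprehension, the two replace passes and the split/filter/join pass are fused into a single left-to-right scan that keeps an output buffer and a pending-dash flag.
import Mathlib
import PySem

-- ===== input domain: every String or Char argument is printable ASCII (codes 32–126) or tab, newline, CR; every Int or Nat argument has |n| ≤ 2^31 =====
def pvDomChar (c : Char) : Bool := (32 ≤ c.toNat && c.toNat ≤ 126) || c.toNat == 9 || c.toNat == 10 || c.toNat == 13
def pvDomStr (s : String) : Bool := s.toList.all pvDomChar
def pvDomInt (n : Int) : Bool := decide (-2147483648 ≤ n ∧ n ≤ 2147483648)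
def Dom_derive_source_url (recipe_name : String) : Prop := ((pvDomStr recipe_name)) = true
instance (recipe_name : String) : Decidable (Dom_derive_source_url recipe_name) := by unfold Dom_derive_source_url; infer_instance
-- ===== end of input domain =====

-- B replaces A's multi-pass cleanup (filter + two replaces + split/filter/join) by a single
-- left-to-right pass with a pending-dash flag (objective: alternative decomposition).

-- ===== PORT A =====
def derive_source_url (recipe_name : String) : String :=
  let clean1 := PySem.Str.lower recipe_name
  -- the unicode_replacements dict loop, unrolled in insertion order
  let clean2 := PySem.Str.replace clean1 "\u2019" "'"
  let clean3 := PySem.Str.replace clean2 "\u2018" "'"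
  let clean4 := PySem.Str.replace clean3 "\u201c" "\""
  let clean5 := PySem.Str.replace clean4 "\u201d" "\""
  let clean6 := PySem.Str.replace clean5 "\u00a0" " "
  -- "".join(c for c in clean_name if c.isalnum() or c in " -&")
  let cs := clean6.toList.filter (fun c => PySem.Chars.isalnum c || c == ' ' || c == '-' || c == '&')
  -- .replace(" ", "-").replace("&", "and")
  let cs2 := PySem.Chars.replace (PySem.Chars.replace cs [' '] ['-']) ['&'] ['a','n','d']
  -- "-".join(filter(None, clean_name.split("-")))
  let core := PySem.Chars.join ['-'] ((PySem.Chars.splitOn cs2 ['-']).filter (fun p => !p.isEmpty))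
  String.ofList ("https://punchdrink.com/recipes/".toList ++ core ++ ['/'])

-- ===== PORT B =====
-- the single pass: out = accumulated chars, pending = a dash waiting to be flushed
def pvBLoop : List Char → List Char → Bool → List Char
  | [], out, _ => out
  | c :: rest, out, pending =>
    if c == ' ' || c == '-' then
      pvBLoop rest out (if out.isEmpty then pending else true)
    else if c == '&' then
      pvBLoop rest ((if pending then out ++ ['-'] else out) ++ ['a','n','d']) false
    else if PySem.Chars.isalnum c then
      pvBLoop rest ((if pending then out ++ ['-'] else out) ++ [c]) false
    else
      pvBLoop rest out pending

def derive_source_url_alt (recipe_name : String) : String :=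
  let clean1 := PySem.Str.lower recipe_name
  let clean2 := PySem.Str.replace clean1 "\u2019" "'"
  let clean3 := PySem.Str.replace clean2 "\u2018" "'"
  let clean4 := PySem.Str.replace clean3 "\u201c" "\""
  let clean5 := PySem.Str.replace clean4 "\u201d" "\""
  let clean6 := PySem.Str.replace clean5 "\u00a0" " "
  String.ofList ("https://punchdrink.com/recipes/".toList ++ pvBLoop clean6.toList [] false ++ ['/'])

-- ===== PRECONDITION & SPEC =====
def Spec_derive_source_url (recipe_name : String) (out : String) : Prop := out = derive_source_url_alt recipe_name
instance (recipe_name : String) (out : String) : Decidable (Spec_derive_source_url recipe_name out) := by unfold Spec_derive_source_url; infer_instance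

-- ===== CLAIM (what is proved, stated in full; the proofs are below) =====
def Claim_equal_derive_source_url : Prop := ∀ (recipe_name : String), Dom_derive_source_url recipe_name → Spec_derive_source_url recipe_name (derive_source_url recipe_name)

-- ===== LEMMAS AND PROOFS =====

-- spec-side helpers: separators, the per-char expansion, the kept characters
def pvSep (c : Char) : Bool := c == ' ' || c == '-'
def pvE (c : Char) : List Char := if c == '&' then ['a','n','d'] else [c]
def pvE' (c : Char) : List Char := if pvSep c then ['-'] else pvE c
def pvKeep (c : Char) : Bool := PySem.Chars.isalnum c || c == ' ' || c == '-' || c == '&'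

-- reference splitter: Python's s.split(d) for a single-char separator
def pvSplit1 (d : Char) (cur : List Char) : List Char → List (List Char)
  | [] => [cur]
  | c :: r => if c == d then cur :: pvSplit1 d [] r else pvSplit1 d (cur ++ [c]) r

-- reference semantics of the cleanup: pvStart from scratch, pvGlue after a nonempty prefix
def pvGlue : List Char → Bool → List Char
  | [], _ => []
  | c :: r, p => if pvSep c then pvGlue r true
                 else (if p then ['-'] else []) ++ pvE c ++ pvGlue r false

def pvStart : List Char → List Char
  | [] => []
  | c :: r => if pvSep c then pvStart r else pvE c ++ pvGlue r false

theorem pvReplaceGoSpec (o : Char) (new : List Char) :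
    ∀ (fuel : Nat) (l acc : List Char), l.length ≤ fuel →
      PySem.Chars.replace.go [o] new fuel l acc
        = acc.reverse ++ l.flatMap (fun c => if c == o then new else [c]) := by
  intro fuel
  induction fuel with
  | zero =>
    intro l acc h
    have : l = [] := by cases l <;> simp_all
    subst this; simp [PySem.Chars.replace.go]
  | succ n ih =>
    intro l acc h
    cases l with
    | nil => simp [PySem.Chars.replace.go]
    | cons c t =>
      rw [PySem.Chars.replace.go]
      by_cases hc : c = o
      · subst hc
        have hpre : List.isPrefixOf [c] (c :: t) = true := by simp [List.isPrefixOf]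
        simp only [hpre, if_pos]
        have hdrop : List.drop [c].length (c :: t) = t := by simp
        rw [hdrop, ih t _ (by simpa using Nat.le_of_succ_le_succ h)]
        simp
      · have hpre : List.isPrefixOf [o] (c :: t) = false := by
          simp only [List.isPrefixOf, Bool.and_true, beq_eq_false_iff_ne, ne_eq]
          exact fun h' => hc h'.symm
        simp only [hpre, Bool.false_eq_true, if_false]
        rw [ih t _ (by simpa using Nat.le_of_succ_le_succ h)]
        simp [hc]

theorem pvReplaceSingle (o : Char) (new : List Char) (l : List Char) :
    PySem.Chars.replace l [o] new = l.flatMap (fun c => if c == o then new else [c]) := by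
  rw [PySem.Chars.replace]
  simp only [List.isEmpty_cons, Bool.false_eq_true, if_false]
  simpa using pvReplaceGoSpec o new l.length l []

theorem pvSplitGoSpec (d : Char) :
    ∀ (fuel : Nat) (l cur : List Char) (acc : List (List Char)), l.length < fuel →
      PySem.Chars.splitOn.go [d] fuel l cur acc
        = acc.reverse ++ pvSplit1 d cur.reverse l := by
  intro fuel
  induction fuel with
  | zero => intro l cur acc h; omega
  | succ n ih =>
    intro l cur acc h
    cases l with
    | nil => simp [PySem.Chars.splitOn.go, pvSplit1]
    | cons c t =>
      rw [PySem.Chars.splitOn.go]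
      by_cases hc : c = d
      · subst hc
        have hpre : List.isPrefixOf [c] (c :: t) = true := by simp [List.isPrefixOf]
        simp only [hpre, if_pos]
        have hdrop : List.drop [c].length (c :: t) = t := by simp
        rw [hdrop, ih t [] _ (by simpa using Nat.lt_of_succ_lt_succ h)]
        simp [pvSplit1]
      · have hpre : List.isPrefixOf [d] (c :: t) = false := by
          simp only [List.isPrefixOf, Bool.and_true, beq_eq_false_iff_ne, ne_eq]
          exact fun h' => hc h'.symm
        simp only [hpre, Bool.false_eq_true, if_false]
        rw [ih t (c :: cur) _ (by simpa using Nat.lt_of_succ_lt_succ h)]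
        simp [pvSplit1, hc]

theorem pvSplitOnSingle (d : Char) (l : List Char) :
    PySem.Chars.splitOn l [d] = pvSplit1 d [] l := by
  rw [PySem.Chars.splitOn]
  simpa using pvSplitGoSpec d (l.length + 1) l [] [] (by omega)

theorem pvSplit1AppendNosep (d : Char) :
    ∀ (pre : List Char), (∀ c ∈ pre, (c == d) = false) →
      ∀ (cur l : List Char), pvSplit1 d cur (pre ++ l) = pvSplit1 d (cur ++ pre) l := by
  intro pre
  induction pre with
  | nil => intro _ cur l; simp
  | cons a t ih =>
    intro h cur l
    have ha : (a == d) = false := h a (by simp)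
    simp only [List.cons_append, pvSplit1, ha, Bool.false_eq_true, if_false]
    rw [ih (fun c hc => h c (by simp [hc])) (cur ++ [a]) l]
    simp

theorem pvSplit1Cons (d : Char) :
    ∀ (l cur : List Char), ∃ t L, pvSplit1 d cur l = (cur ++ t) :: L := by
  intro l
  induction l with
  | nil => intro cur; exact ⟨[], [], by simp [pvSplit1]⟩
  | cons c r ih =>
    intro cur
    by_cases hc : c = d
    · subst hc; exact ⟨[], pvSplit1 c [] r, by simp [pvSplit1]⟩
    · obtain ⟨t, L, hTL⟩ := ih (cur ++ [c])
      exact ⟨[c] ++ t, L, by simp only [pvSplit1, beq_iff_eq, hc, if_false]; rw [hTL]; simp⟩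

theorem pvENoSep (c : Char) (h : pvSep c = false) : ∀ x ∈ pvE c, (x == '-') = false := by
  intro x hx
  by_cases ha : c = '&'
  · subst ha
    have hE : pvE '&' = ['a','n','d'] := rfl
    rw [hE] at hx
    fin_cases hx <;> decide
  · simp only [pvE, beq_iff_eq, ha, if_false, List.mem_singleton] at hx
    subst hx
    simp only [pvSep, Bool.or_eq_false_iff, beq_eq_false_iff_ne, ne_eq] at h
    simp [h.2]

theorem pvENe (c : Char) : pvE c ≠ [] := by
  by_cases ha : c = '&' <;> simp [pvE, ha]

-- A-side: split/filter/join of the fused per-char expansion equals the reference semantics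
theorem pvASide (fs : List Char) :
    (∀ cur : List Char, cur ≠ [] →
        PySem.Chars.join ['-'] ((pvSplit1 '-' cur (fs.flatMap pvE')).filter (fun p => !p.isEmpty))
          = cur ++ pvGlue fs false)
    ∧ ((if ((pvSplit1 '-' [] (fs.flatMap pvE')).filter (fun p => !p.isEmpty)).isEmpty then ([] : List Char)
        else '-' :: PySem.Chars.join ['-'] ((pvSplit1 '-' [] (fs.flatMap pvE')).filter (fun p => !p.isEmpty)))
          = pvGlue fs true) := by
  induction fs with
  | nil =>
    constructor
    · intro cur hcur
      have h1 : ([] : List Char).flatMap pvE' = [] := rfl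
      have h2 : pvSplit1 '-' cur [] = [cur] := rfl
      have h3 : List.filter (fun p => !p.isEmpty) [cur] = [cur] := by simp [hcur]
      rw [h1, h2, h3, PySem.Chars.join_singleton]
      simp [pvGlue]
    · simp [pvSplit1, pvGlue, List.filter]
  | cons c r ih =>
    by_cases hs : pvSep c = true
    · -- separator head: the fused list starts with '-'
      have hE' : pvE' c = ['-'] := by simp [pvE', hs]
      constructor
      · intro cur hcur
        simp only [List.flatMap_cons, hE', List.cons_append, pvSplit1, beq_self_eq_true, if_pos,
          List.nil_append]
        have hcurKeep : (!cur.isEmpty) = true := by simp [hcur]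
        simp only [List.filter_cons, hcurKeep, if_true]
        have h2 := ih.2
        rcases hF : ((pvSplit1 '-' [] (r.flatMap pvE')).filter (fun p => !p.isEmpty)) with _ | ⟨q, L⟩
        · rw [hF] at h2
          simp only [List.isEmpty_nil, if_pos] at h2
          rw [hF, PySem.Chars.join_singleton]
          simp [pvGlue, hs, ← h2]
        · rw [hF] at h2
          simp only [List.isEmpty_cons, Bool.false_eq_true, if_false] at h2
          rw [hF, PySem.Chars.join_cons_cons]
          simp [pvGlue, hs, ← h2]
      · simp only [List.flatMap_cons, hE', List.cons_append, pvSplit1, beq_self_eq_true, if_pos,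
          List.nil_append]
        simp only [List.filter_cons, List.isEmpty_nil, Bool.not_true, Bool.false_eq_true, if_false]
        simpa [pvGlue, hs] using ih.2
    · -- emitting head: the fused list starts with pvE c, which contains no '-'
      have hs' : pvSep c = false := by simpa using hs
      have hE' : pvE' c = pvE c := by simp [pvE', hs']
      have hburst : ∀ cur : List Char,
          pvSplit1 '-' cur (pvE c ++ r.flatMap pvE') = pvSplit1 '-' (cur ++ pvE c) (r.flatMap pvE') :=
        fun cur => pvSplit1AppendNosep '-' (pvE c) (pvENoSep c hs') cur _
      constructor
      · intro cur hcur
        simp only [List.flatMap_cons, hE']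
        rw [hburst cur]
        have : cur ++ pvE c ≠ [] := by
          simp [List.append_eq_nil_iff, pvENe c]
        rw [ih.1 (cur ++ pvE c) this]
        simp [pvGlue, hs']
      · simp only [List.flatMap_cons, hE']
        rw [show pvSplit1 '-' [] (pvE c ++ r.flatMap pvE')
              = pvSplit1 '-' (pvE c) (r.flatMap pvE') by simpa using hburst []]
        have hj := ih.1 (pvE c) (pvENe c)
        obtain ⟨t, L, hTL⟩ := pvSplit1Cons '-' (r.flatMap pvE') (pvE c)
        rw [hTL] at hj ⊢
        have hne : (!(pvE c ++ t).isEmpty) = true := by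
          simp [List.append_eq_nil_iff, pvENe c]
        simp only [List.filter_cons, hne, if_true] at hj ⊢
        simp only [List.isEmpty_cons, Bool.false_eq_true, if_false]
        rw [hj]
        simp [pvGlue, hs']

theorem pvAStart (fs : List Char) :
    PySem.Chars.join ['-'] ((pvSplit1 '-' [] (fs.flatMap pvE')).filter (fun p => !p.isEmpty))
      = pvStart fs := by
  induction fs with
  | nil => simp [pvSplit1, pvStart, List.filter, PySem.Chars.join, List.intercalate]
  | cons c r ih =>
    by_cases hs : pvSep c = true
    · have hE' : pvE' c = ['-'] := by simp [pvE', hs]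
      simp only [List.flatMap_cons, hE', List.cons_append, pvSplit1, beq_self_eq_true, if_pos,
        List.nil_append]
      simp only [List.filter_cons, List.isEmpty_nil, Bool.not_true, Bool.false_eq_true, if_false]
      simp [pvStart, hs, ih]
    · have hs' : pvSep c = false := by simpa using hs
      have hE' : pvE' c = pvE c := by simp [pvE', hs']
      simp only [List.flatMap_cons, hE']
      rw [show pvSplit1 '-' [] (pvE c ++ r.flatMap pvE')
            = pvSplit1 '-' (pvE c) (r.flatMap pvE') by
          simpa using pvSplit1AppendNosep '-' (pvE c) (pvENoSep c hs') [] (r.flatMap pvE')]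
      rw [(pvASide r).1 (pvE c) (pvENe c)]
      simp [pvStart, hs']

-- the two chained replaces are the fused per-char expansion
theorem pvRFusion (l : List Char) :
    PySem.Chars.replace (PySem.Chars.replace l [' '] ['-']) ['&'] ['a','n','d']
      = l.flatMap pvE' := by
  rw [pvReplaceSingle, pvReplaceSingle, List.flatMap_assoc]
  have hfg : (fun c => (if c == ' ' then ['-'] else [c]).flatMap
      (fun c => if c == '&' then ['a','n','d'] else [c])) = pvE' := by
    funext c
    by_cases h1 : c = ' '
    · subst h1; simp [pvE', pvSep]
    · by_cases h2 : c = '&'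
      · subst h2; simp [pvE', pvSep, pvE]
      · by_cases h3 : c = '-'
        · subst h3; simp [pvE', pvSep]
        · simp [h1, h2, h3, pvE', pvSep, pvE]
  rw [hfg]

-- B-side: the loop ignores dropped characters
theorem pvBFilter : ∀ (cs out : List Char) (p : Bool),
    pvBLoop cs out p = pvBLoop (cs.filter pvKeep) out p := by
  intro cs
  induction cs with
  | nil => intro out p; simp
  | cons c t ih =>
    intro out p
    by_cases hk : pvKeep c = true
    · rw [List.filter_cons_of_pos hk]
      by_cases h1 : (c == ' ' || c == '-') = true
      · simp only [pvBLoop, h1, if_pos]; exact ih _ _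
      · simp only [pvBLoop, h1, Bool.false_eq_true, if_false]
        by_cases h2 : (c == '&') = true
        · simp only [h2, if_pos]; exact ih _ _
        · simp only [h2, Bool.false_eq_true, if_false]
          by_cases h3 : PySem.Chars.isalnum c = true
          · simp only [h3, if_pos]; exact ih _ _
          · simp only [h3, Bool.false_eq_true, if_false]; exact ih _ _
    · rw [List.filter_cons_of_neg (by simpa using hk)]
      have hk' : PySem.Chars.isalnum c = false ∧ (c == ' ') = false ∧ (c == '-') = false
          ∧ (c == '&') = false := by
        simp only [pvKeep, Bool.or_eq_true, not_or, Bool.not_eq_true] at hk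
        exact ⟨hk.1.1.1, hk.1.1.2, hk.1.2, hk.2⟩
      simp only [pvBLoop, hk'.1, hk'.2.1, hk'.2.2.1, hk'.2.2.2, Bool.or_self,
        Bool.false_eq_true, if_false]
      exact ih _ _

theorem pvBGlue : ∀ (fs : List Char), (∀ c ∈ fs, pvKeep c = true) →
    ∀ (out : List Char) (p : Bool), out ≠ [] → pvBLoop fs out p = out ++ pvGlue fs p := by
  intro fs
  induction fs with
  | nil => intro _ out p _; simp [pvBLoop, pvGlue]
  | cons c r ih =>
    intro hk out p hout
    have hkr : ∀ x ∈ r, pvKeep x = true := fun x hx => hk x (by simp [hx])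
    by_cases h1 : (c == ' ' || c == '-') = true
    · simp only [pvBLoop, h1, if_pos]
      have : out.isEmpty = false := by simp [hout]
      rw [this]
      simp only [Bool.false_eq_true, if_false]
      rw [ih hkr out true hout]
      have : pvSep c = true := h1
      simp [pvGlue, this]
    · have hsep : pvSep c = false := by simpa [pvSep] using h1
      by_cases h2 : (c == '&') = true
      · simp only [pvBLoop, h1, Bool.false_eq_true, if_false, h2, if_pos]
        have hE : pvE c = ['a','n','d'] := by simp [pvE, h2]
        have hne : (if p then out ++ ['-'] else out) ++ ['a','n','d'] ≠ [] := by
          cases p <;> simp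
        rw [ih hkr _ false hne]
        cases p <;> simp [pvGlue, hsep, hE]
      · have ha : PySem.Chars.isalnum c = true := by
          have := hk c (by simp)
          simp only [pvKeep, Bool.or_eq_true] at this
          rcases this with ((h | h) | h) | h
          · exact h
          · exact absurd (show pvSep c = true by simp [pvSep, h]) (by simp [hsep])
          · exact absurd (show pvSep c = true by simp [pvSep, h]) (by simp [hsep])
          · exact absurd h (by simp [h2])
        simp only [pvBLoop, h1, Bool.false_eq_true, if_false, h2, ha, if_pos]
        have hE : pvE c = [c] := by
          simp only [pvE, h2, Bool.false_eq_true, if_false]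
        have hne : (if p then out ++ ['-'] else out) ++ [c] ≠ [] := by
          cases p <;> simp
        rw [ih hkr _ false hne]
        cases p <;> simp [pvGlue, hsep, hE]

theorem pvBStart : ∀ (fs : List Char), (∀ c ∈ fs, pvKeep c = true) →
    pvBLoop fs [] false = pvStart fs := by
  intro fs
  induction fs with
  | nil => intro _; simp [pvBLoop, pvStart]
  | cons c r ih =>
    intro hk
    have hkr : ∀ x ∈ r, pvKeep x = true := fun x hx => hk x (by simp [hx])
    by_cases h1 : (c == ' ' || c == '-') = true
    · simp only [pvBLoop, h1, if_pos, List.isEmpty_nil, if_pos]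
      rw [ih hkr]
      have : pvSep c = true := h1
      simp [pvStart, this]
    · have hsep : pvSep c = false := by simpa [pvSep] using h1
      by_cases h2 : (c == '&') = true
      · simp only [pvBLoop, h1, Bool.false_eq_true, if_false, h2, if_pos]
        rw [pvBGlue r hkr _ false (by simp)]
        simp [pvStart, hsep, pvE, h2]
      · have ha : PySem.Chars.isalnum c = true := by
          have := hk c (by simp)
          simp only [pvKeep, Bool.or_eq_true] at this
          rcases this with ((h | h) | h) | h
          · exact h
          · exact absurd (show pvSep c = true by simp [pvSep, h]) (by simp [hsep])
          · exact absurd (show pvSep c = true by simp [pvSep, h]) (by simp [hsep])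
          · exact absurd h (by simp [h2])
        simp only [pvBLoop, h1, Bool.false_eq_true, if_false, h2, ha, if_pos]
        rw [pvBGlue r hkr _ false (by simp)]
        simp only [pvStart, hsep, Bool.false_eq_true, if_false, pvE, h2, List.nil_append]

-- the two cores agree on every character list
theorem pvCoreEq (t : List Char) :
    PySem.Chars.join ['-']
      ((PySem.Chars.splitOn
          (PySem.Chars.replace
            (PySem.Chars.replace
              (t.filter (fun c => PySem.Chars.isalnum c || c == ' ' || c == '-' || c == '&'))
              [' '] ['-'])
            ['&'] ['a','n','d'])
          ['-']).filter (fun p => !p.isEmpty))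
      = pvBLoop t [] false := by
  have hfilter : t.filter (fun c => PySem.Chars.isalnum c || c == ' ' || c == '-' || c == '&')
      = t.filter pvKeep := rfl
  rw [hfilter, pvRFusion, pvSplitOnSingle, pvAStart]
  rw [pvBFilter t [] false, pvBStart _ (fun c hc => List.of_mem_filter hc)]

-- ===== VERDICT (by name: the statement is the Claim_ definition above) =====
theorem derive_source_url_spec : Claim_equal_derive_source_url := by
  intro recipe_name _
  unfold Spec_derive_source_url derive_source_url derive_source_url_alt
  simp only []
  rw [pvCoreEq]
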